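-- pv_equiv track=rewrite | github.com/NoneYett/Conjuntos | Conjuntos_Bit.py | classifica
-- ===== SOURCE A (Python) =====
-- def classifica(b, elem):#Como toda a relacao dos bits ligados estao na lista b, foi usado apenas ela para verificar as classificacoes.
--     if(elem == 0):
--         return 'STI' # para o caso unico e especifico do numero de elementos ser 0.
--     classe = ""
--
--     #lista aux ajuda na logica da classificacao.
--     aux = [True for x in range(4)] #[reflexiva,simetrica,transitiva,irreflexiva]
--
--     for i in range(elem):#primeiro for percorre os elementos como numa relacao (x,y).
--                          #no caso o i representara o X na relacao usando a lista b para verificar os valores.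
--         #reflexiva
--         if(not b[i][i]):
--             aux[0] = False
--
--         for j in range(elem): #o j seria o Y, dai todo o resto utiliza os conceitos logicos de cada classificacao.
--
--             #simetrica
--             if(b[i][j] and not b[j][i]):
--                 aux[1] = False
--
--             #transitiva
--             for k in range(elem):
--                 if(b[i][j] and b[j][k] and not b[i][k]):
--                     aux[2] = False
--
--             #Irreflexiva
--             if(i == j and b[i][j]):
--                 aux[3] = False
--
--     #utiliza os valores booleanos da lista aux para concatenar as classificacoes de acordo com o relacao.
--     if(aux[0]):
--         classe += 'R'
--     if(aux[1]):
--         classe += 'S'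
--     if(aux[2]):
--         classe += 'T'
--     if("R" in classe and "S" in classe and "T" in classe):
--         classe += 'E'
--     if(aux[3]):
--         classe += 'I'
--
--     classe += classificaFuncao(b,elem) #chama a funcao para classificacao das funcoes.
--
--     return classe
--
-- def classificaFuncao(b,elem): #responsavel pela classificacao de funcoes.
--     #variaveis que auxiliam nas classificacoes de funcao.
--     aux_Fi = []
--     aux_Fs = False
--     Fi = True
--     Fs = True
--     classe = ''
--     #o for aqui usa a mesma logica do for anterior nas classificacoes.
--     for i in range(elem):
--
--         #Funcao
--         aux_F = b[i].count(True) #se em b[i] tiver mais de um valor True significa que existe mais de um elemento na relacao ligado a i.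
--         if(aux_F == 0 or aux_F > 1):#lembrando que i pode ser pensado como X, entao mais de um valor True significa o mesmo
--                                     #X associado a mais de um Y diferente.
--             return ''    #caso nao seja funcao, ja sera retornado a string vazia sem analisar bijetora, sobrejetora ou injetora.
--
--         for j in range(elem):
--
--             #Injetora
--             if(b[j][i] and len(aux_Fi) < 1):
--                 aux_Fi.append(b[j][i])
--             elif(b[j][i]):
--                 Fi = False
--
--             #Sobrejetora
--             if(b[j][i]):
--                 aux_Fs = True
--                 continue
--         #daqui para baixo esta fora do segundo for e dentro do primeiro
--         #por causa da logica usada para classificar em sobre e injetora esse codigo abaixo dentro do 1 for e necessario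
--         if(not aux_Fs):
--             Fs = False
--         aux_Fs = False
--
--         aux_Fi = []
--
--     #atribui as classes de funcao da relacao
--     classe += 'F'
--     if(Fi and Fs):
--         classe += 'FbFsFi'
--     else:
--         if(Fs):
--             classe += 'Fs'
--         if(Fi):
--             classe += 'Fi'
--
--     return classe
-- ===== SOURCE B (Python) =====
-- def classifica(b, elem):
--     # Sparse edge-set decomposition: extract the relation once as a list/set of
--     # pairs, then test R/S/T/I and the function classes on the edges and on a
--     # degree counter instead of re-scanning the boolean matrix with flag loops.
--     if elem == 0:
--         return 'STI'
--     rng = range(elem)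
--     edges = [(i, j) for i in rng for j in rng if b[i][j]]
--     eset = set(edges)
--     refl = all((i, i) in eset for i in rng)
--     irr = all(i != j for (i, j) in edges)
--     symm = all((j, i) in eset for (i, j) in edges)
--     trans = all(j2 != j or (i, k) in eset
--                 for (i, j) in edges for (j2, k) in edges)
--     classe = ''
--     if refl:
--         classe += 'R'
--     if symm:
--         classe += 'S'
--     if trans:
--         classe += 'T'
--     if refl and symm and trans:
--         classe += 'E'
--     if irr:
--         classe += 'I'
--     if any(b[i].count(True) != 1 for i in rng):
--         return classe
--     indeg = {}
--     for j in [j for (_, j) in edges]: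
--         indeg[j] = indeg.get(j, 0) + 1
--     fs = all(indeg.get(i, 0) >= 1 for i in rng)
--     fi = all(indeg.get(i, 0) <= 1 for i in rng)
--     suffix = 'F'
--     if fs and fi:
--         suffix += 'FbFsFi'
--     else:
--         if fs:
--             suffix += 'Fs'
--         if fi:
--             suffix += 'Fi'
--     return classe + suffix
-- ===== Notes on version B (the rewrite author's own statement) =====
-- stated objective: alternative
-- what changed: B extracts the relation once as an explicit edge list/set of pairs and classifies on that sparse structure — reflexive/symmetric/transitive/irreflexive become membership tests over the edges (an edge-join for transitivity) and injective/surjective come from an in-degree counter dict built from the edge targets — instead of A's triple-nested boolean-matrix scans with mutable flag lists and the aux_Fi/aux_Fs reset logic.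
import Mathlib
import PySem

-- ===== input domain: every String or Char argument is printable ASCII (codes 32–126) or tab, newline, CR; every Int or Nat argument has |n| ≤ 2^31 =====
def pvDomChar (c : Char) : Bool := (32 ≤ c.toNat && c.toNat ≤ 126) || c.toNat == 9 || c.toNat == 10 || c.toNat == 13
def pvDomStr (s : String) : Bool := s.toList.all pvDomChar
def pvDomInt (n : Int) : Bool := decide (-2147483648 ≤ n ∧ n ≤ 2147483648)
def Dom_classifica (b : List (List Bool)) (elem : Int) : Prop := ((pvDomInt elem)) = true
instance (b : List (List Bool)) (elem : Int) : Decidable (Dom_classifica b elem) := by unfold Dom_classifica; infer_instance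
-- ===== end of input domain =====

-- B extracts the relation once as an edge list/set and classifies on the edges and a
-- degree counter instead of A's matrix flag loops (objective: alternative decomposition).

-- shared safe-indexing helper: b[i][j] (exact under Pre_, where every access is in range)
def pvGet2 (b : List (List Bool)) (i j : Int) : Bool :=
  PySem.List.pyGetD (PySem.List.pyGetD b i []) j false

-- ===== PORT A =====
-- the body of classificaFuncao's inner j-loop (aux_Fi/aux_Fs/Fi updates), named so the
-- loop-invariant lemmas below can speak about one step
def pvStepF (b : List (List Bool)) (i : Int) (s : List Bool × Bool × Bool) (j : Int) :
    List Bool × Bool × Bool :=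
  let p := pvGet2 b j i
  let afi_fi := if p && decide (s.1.length < 1) then (s.1 ++ [p], s.2.2)
                else if p then (s.1, false) else (s.1, s.2.2)
  let afs := if p then true else s.2.1
  (afi_fi.1, afs, afi_fi.2)

-- classificaFuncao's outer loop with its early 'return '''
def pvGoA (b : List (List Bool)) (elem : Int) (l : List Int) (fi fs : Bool) : String :=
  match l with
  | [] =>
      "F" ++ (if fi && fs then "FbFsFi"
              else (if fs then "Fs" else "") ++ (if fi then "Fi" else ""))
  | i :: rest =>
      let auxF := (PySem.List.pyGetD b i []).count true
      if auxF == 0 || decide (auxF > 1) then ""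
      else
        let st := (PySem.List.pyRange 0 elem 1).foldl (pvStepF b i) ([], false, fi)
        let fs' := if !st.2.1 then false else fs
        pvGoA b elem rest st.2.2 fs'

def pvClassificaFuncao (b : List (List Bool)) (elem : Int) : String :=
  pvGoA b elem (PySem.List.pyRange 0 elem 1) true true

def classifica (b : List (List Bool)) (elem : Int) : String :=
  if elem == 0 then "STI"
  else
    let aux := (PySem.List.pyRange 0 elem 1).foldl
      (fun (a : Bool × Bool × Bool × Bool) i =>
        let a0 := if !(pvGet2 b i i) then false else a.1
        let rest := (PySem.List.pyRange 0 elem 1).foldl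
          (fun (s : Bool × Bool × Bool) j =>
            let s1 := if pvGet2 b i j && !(pvGet2 b j i) then false else s.1
            let s2 := (PySem.List.pyRange 0 elem 1).foldl
              (fun t k =>
                if pvGet2 b i j && pvGet2 b j k && !(pvGet2 b i k) then false else t)
              s.2.1
            let s3 := if i == j && pvGet2 b i j then false else s.2.2
            (s1, s2, s3)) (a.2.1, a.2.2.1, a.2.2.2)
        (a0, rest.1, rest.2.1, rest.2.2)) (true, true, true, true)
    let classe := (if aux.1 then "R" else "") ++ (if aux.2.1 then "S" else "")
                  ++ (if aux.2.2.1 then "T" else "")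
    let classe := if PySem.Str.isIn "R" classe && PySem.Str.isIn "S" classe
                     && PySem.Str.isIn "T" classe then classe ++ "E" else classe
    let classe := if aux.2.2.2 then classe ++ "I" else classe
    classe ++ pvClassificaFuncao b elem

-- ===== PORT B =====
-- the edge list [(i, j) for i in rng for j in rng if b[i][j]] of Source B
def pvEdges (b : List (List Bool)) (elem : Int) : List (Int × Int) :=
  (PySem.List.pyRange 0 elem 1).flatMap
    (fun i => ((PySem.List.pyRange 0 elem 1).filter (fun j => pvGet2 b i j)).map (fun j => (i, j)))

def classifica_alt (b : List (List Bool)) (elem : Int) : String :=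
  if elem == 0 then "STI"
  else
    let rng := PySem.List.pyRange 0 elem 1
    let edges := pvEdges b elem
    let eset := PySem.Set.ofList edges
    let refl := rng.all (fun i => PySem.Set.contains eset (i, i))
    let irr := edges.all (fun e => e.1 != e.2)
    let symm := edges.all (fun e => PySem.Set.contains eset (e.2, e.1))
    let trans := edges.all (fun e => edges.all (fun f =>
                   f.1 != e.2 || PySem.Set.contains eset (e.1, f.2)))
    let classe := (if refl then "R" else "") ++ (if symm then "S" else "")
                  ++ (if trans then "T" else "")
    let classe := if refl && symm && trans then classe ++ "E" else classe
    let classe := if irr then classe ++ "I" else classe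
    if rng.any (fun i => (PySem.List.pyGetD b i []).count true != 1) then classe
    else
      let cols := edges.map (fun e => e.2)
      let indeg := cols.foldl (fun (d : PySem.Dict Int Int) x => d.insert x (d.getD x 0 + 1))
                     PySem.Dict.empty
      let fs := rng.all (fun i => decide (1 ≤ indeg.getD i 0))
      let fi := rng.all (fun i => decide (indeg.getD i 0 ≤ 1))
      classe ++ "F" ++ (if fs && fi then "FbFsFi"
                        else (if fs then "Fs" else "") ++ (if fi then "Fi" else ""))

-- ===== PRECONDITION & SPEC =====
-- Pre_ excludes exactly the inputs where Python A raises IndexError: elem exceeding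
-- the number of rows, or one of the first elem rows shorter than elem.
def Pre_classifica (b : List (List Bool)) (elem : Int) : Prop :=
  elem ≤ (b.length : Int) ∧ ∀ r ∈ b.take elem.toNat, elem ≤ (r.length : Int)
instance (b : List (List Bool)) (elem : Int) : Decidable (Pre_classifica b elem) := by
  unfold Pre_classifica; infer_instance
def pvWitness_classifica : List (List Bool) × Int := ([[true, false], [false, true]], 2)

def Spec_classifica (b : List (List Bool)) (elem : Int) (out : String) : Prop := out = classifica_alt b elem
instance (b : List (List Bool)) (elem : Int) (out : String) : Decidable (Spec_classifica b elem out) := by unfold Spec_classifica; infer_instance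

-- ===== CLAIM (what is proved, stated in full; the proofs are below) =====
def Claim_equal_classifica : Prop := ∀ (b : List (List Bool)) (elem : Int), Dom_classifica b elem → Pre_classifica b elem → Spec_classifica b elem (classifica b elem)

-- ===== LEMMAS AND PROOFS =====
-- Bool pointwise identity used to align A's negated-conjunction flags with B's implications
theorem pvBoolSymm (a c : Bool) : (!(a && !c)) = (!a || c) := by cases a <;> cases c <;> rfl

-- the inner j-fold of A's property loop (triple state, k-fold inside)
theorem pvFoldJ (b : List (List Bool)) (elem i : Int) (nn : List Int) (s : Bool × Bool × Bool) :
    nn.foldl (fun (s : Bool × Bool × Bool) j =>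
      let s1 := if pvGet2 b i j && !(pvGet2 b j i) then false else s.1
      let s2 := (PySem.List.pyRange 0 elem 1).foldl
        (fun t k => if pvGet2 b i j && pvGet2 b j k && !(pvGet2 b i k) then false else t) s.2.1
      let s3 := if i == j && pvGet2 b i j then false else s.2.2
      (s1, s2, s3)) s
    = (s.1 && nn.all (fun j => !(pvGet2 b i j && !(pvGet2 b j i))),
       s.2.1 && nn.all (fun j =>
         !((PySem.List.pyRange 0 elem 1).any (fun k => pvGet2 b i j && pvGet2 b j k && !(pvGet2 b i k)))),
       s.2.2 && nn.all (fun j => !(i == j && pvGet2 b i j))) := by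
  induction nn generalizing s with
  | nil => simp
  | cons j t ih =>
    obtain ⟨s1, s2, s3⟩ := s
    rw [List.foldl_cons, ih]
    simp only [PySem.List.foldl_if_false_eq, List.all_cons, Prod.mk.injEq]
    constructor
    · by_cases h : (pvGet2 b i j && !(pvGet2 b j i)) = true <;> simp [h]
    constructor
    · by_cases h : ((PySem.List.pyRange 0 elem 1).any
        (fun k => pvGet2 b i j && pvGet2 b j k && !(pvGet2 b i k))) = true <;>
        simp [Bool.and_assoc]
    · by_cases h : (i == j && pvGet2 b i j) = true <;> simp [h]

-- the outer i-fold of A's property loop (quadruple state)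
theorem pvFoldI (b : List (List Bool)) (elem : Int) (nn : List Int) (a : Bool × Bool × Bool × Bool) :
    nn.foldl (fun (a : Bool × Bool × Bool × Bool) i =>
      let a0 := if !(pvGet2 b i i) then false else a.1
      let rest := (PySem.List.pyRange 0 elem 1).foldl
        (fun (s : Bool × Bool × Bool) j =>
          let s1 := if pvGet2 b i j && !(pvGet2 b j i) then false else s.1
          let s2 := (PySem.List.pyRange 0 elem 1).foldl
            (fun t k => if pvGet2 b i j && pvGet2 b j k && !(pvGet2 b i k) then false else t) s.2.1
          let s3 := if i == j && pvGet2 b i j then false else s.2.2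
          (s1, s2, s3)) (a.2.1, a.2.2.1, a.2.2.2)
      (a0, rest.1, rest.2.1, rest.2.2)) a
    = (a.1 && nn.all (fun i => pvGet2 b i i),
       a.2.1 && nn.all (fun i => (PySem.List.pyRange 0 elem 1).all
         (fun j => !(pvGet2 b i j && !(pvGet2 b j i)))),
       a.2.2.1 && nn.all (fun i => (PySem.List.pyRange 0 elem 1).all (fun j =>
         !((PySem.List.pyRange 0 elem 1).any (fun k => pvGet2 b i j && pvGet2 b j k && !(pvGet2 b i k))))),
       a.2.2.2 && nn.all (fun i => (PySem.List.pyRange 0 elem 1).all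
         (fun j => !(i == j && pvGet2 b i j)))) := by
  induction nn generalizing a with
  | nil => simp
  | cons i t ih =>
    obtain ⟨a0, a1, a2, a3⟩ := a
    rw [List.foldl_cons, ih]
    simp only [pvFoldJ, List.all_cons, Prod.mk.injEq]
    refine ⟨?_, ?_, ?_, ?_⟩
    · by_cases h : pvGet2 b i i = true <;> simp [h]
    · simp [Bool.and_assoc]
    · simp [Bool.and_assoc]
    · simp [Bool.and_assoc]

theorem pvCntOne (t : List Int) (p : Int → Bool) : decide (t.countP p + 1 ≤ 1) = !t.any p := by
  rcases h : t.any p with _|_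
  · have h0 : t.countP p = 0 := List.countP_eq_zero.mpr (by simpa [List.any_eq_false] using h)
    simp [h0]
  · have h0 : 0 < t.countP p := List.countP_pos_iff.mpr (by simpa [List.any_eq_true] using h)
    simp only [Bool.not_true, decide_eq_false_iff_not]; omega

theorem pvAnyCnt (t : List Int) (p : Int → Bool) : t.any p = decide (0 < t.countP p) := by
  rcases h : t.any p with _|_
  · have h0 : t.countP p = 0 := List.countP_eq_zero.mpr (by simpa [List.any_eq_false] using h)
    simp [h0]
  · have h0 : 0 < t.countP p := List.countP_pos_iff.mpr (by simpa [List.any_eq_true] using h)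
    simp [h0]

theorem pvRowOK (c : Nat) : ((c == 0) || decide (c > 1)) = !(c == 1) := by
  rcases c with _|_|n <;> simp

theorem pvIfNotFalse (x fs : Bool) : (if !x then false else fs) = (x && fs) := by cases x <;> rfl

-- A's inner j-fold in classificaFuncao, once aux_Fi is already nonempty
theorem pvInnerNe (b : List (List Bool)) (i : Int) (nn : List Int) (a : List Bool)
    (ha : a ≠ []) (afs fi : Bool) :
    nn.foldl (pvStepF b i) (a, afs, fi)
    = (a, afs || nn.any (fun j => pvGet2 b j i), fi && !nn.any (fun j => pvGet2 b j i)) := by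
  induction nn generalizing afs fi with
  | nil => simp
  | cons j t ih =>
    have hl : ¬ (a.length < 1) := by
      rcases a with _ | ⟨x, a⟩
      · exact absurd rfl ha
      · simp
    by_cases hp : pvGet2 b j i = true
    · have hstep : pvStepF b i (a, afs, fi) j = (a, true, false) := by
        simp [pvStepF, hp, hl]
      rw [List.foldl_cons, hstep, ih]
      simp [hp]
    · have hstep : pvStepF b i (a, afs, fi) j = (a, afs, fi) := by
        simp [pvStepF, hp]
      rw [List.foldl_cons, hstep, ih]
      simp [hp]

-- A's inner j-fold from the reset state ([], False, Fi): aux_Fs and Fi after the loop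
theorem pvInnerNil (b : List (List Bool)) (i : Int) (nn : List Int) (afs fi : Bool) :
    (nn.foldl (pvStepF b i) ([], afs, fi)).2
    = (afs || nn.any (fun j => pvGet2 b j i),
       fi && decide (nn.countP (fun j => pvGet2 b j i) ≤ 1)) := by
  induction nn generalizing afs fi with
  | nil => simp
  | cons j t ih =>
    by_cases hp : pvGet2 b j i = true
    · have hstep : pvStepF b i ([], afs, fi) j = ([true], true, fi) := by
        simp [pvStepF, hp]
      rw [List.foldl_cons, hstep, pvInnerNe b i t [true] (by simp) true fi]
      rw [show ((j :: t).countP (fun j => pvGet2 b j i)) = t.countP (fun j => pvGet2 b j i) + 1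
            from by simp [hp], pvCntOne]
      simp [hp]
    · have hstep : pvStepF b i ([], afs, fi) j = ([], afs, fi) := by
        simp [pvStepF, hp]
      rw [List.foldl_cons, hstep, ih]
      simp [hp]

-- characterization of A's classificaFuncao loop by row/column counts
theorem pvGoA_eq (b : List (List Bool)) (elem : Int) (nn : List Int) (fi fs : Bool) :
    pvGoA b elem nn fi fs =
      if nn.all (fun i => (PySem.List.pyGetD b i []).count true == 1) then
        "F" ++ (if (fi && nn.all (fun i => decide ((PySem.List.pyRange 0 elem 1).countP (fun j => pvGet2 b j i) ≤ 1)))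
                   && (fs && nn.all (fun i => decide (1 ≤ (PySem.List.pyRange 0 elem 1).countP (fun j => pvGet2 b j i)))) then "FbFsFi"
                else (if fs && nn.all (fun i => decide (1 ≤ (PySem.List.pyRange 0 elem 1).countP (fun j => pvGet2 b j i))) then "Fs" else "")
                     ++ (if fi && nn.all (fun i => decide ((PySem.List.pyRange 0 elem 1).countP (fun j => pvGet2 b j i) ≤ 1)) then "Fi" else ""))
      else "" := by
  induction nn generalizing fi fs with
  | nil => simp [pvGoA]
  | cons i t ih =>
    simp only [pvGoA]
    by_cases hc : ((PySem.List.pyGetD b i []).count true == 1) = true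
    · rw [if_neg (by rw [pvRowOK, hc]; simp)]
      rw [show ((PySem.List.pyRange 0 elem 1).foldl (pvStepF b i) ([], false, fi)).2.2
            = (fi && decide ((PySem.List.pyRange 0 elem 1).countP (fun j => pvGet2 b j i) ≤ 1)) from by
          rw [show ((PySem.List.pyRange 0 elem 1).foldl (pvStepF b i) ([], false, fi)).2.2
                = (((PySem.List.pyRange 0 elem 1).foldl (pvStepF b i) ([], false, fi)).2).2 from rfl,
             pvInnerNil]]
      rw [show ((PySem.List.pyRange 0 elem 1).foldl (pvStepF b i) ([], false, fi)).2.1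
            = decide (1 ≤ (PySem.List.pyRange 0 elem 1).countP (fun j => pvGet2 b j i)) from by
          rw [show ((PySem.List.pyRange 0 elem 1).foldl (pvStepF b i) ([], false, fi)).2.1
                = (((PySem.List.pyRange 0 elem 1).foldl (pvStepF b i) ([], false, fi)).2).1 from rfl,
             pvInnerNil]
          simp only [Bool.false_or, pvAnyCnt]
          rfl]
      rw [pvIfNotFalse, ih]
      simp only [List.all_cons, hc, Bool.true_and]
      by_cases h1 : (t.all fun i => (PySem.List.pyGetD b i []).count true == 1) = true
      · rw [if_pos h1, if_pos h1]
        have e1 : (((fi && decide ((PySem.List.pyRange 0 elem 1).countP (fun j => pvGet2 b j i) ≤ 1)) && t.all (fun i => decide ((PySem.List.pyRange 0 elem 1).countP (fun j => pvGet2 b j i) ≤ 1)))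
            = (fi && (decide ((PySem.List.pyRange 0 elem 1).countP (fun j => pvGet2 b j i) ≤ 1) && t.all (fun i => decide ((PySem.List.pyRange 0 elem 1).countP (fun j => pvGet2 b j i) ≤ 1))))) := by
          rw [Bool.and_assoc]
        have e2 : (((decide (1 ≤ (PySem.List.pyRange 0 elem 1).countP (fun j => pvGet2 b j i)) && fs) && t.all (fun i => decide (1 ≤ (PySem.List.pyRange 0 elem 1).countP (fun j => pvGet2 b j i))))
            = (fs && (decide (1 ≤ (PySem.List.pyRange 0 elem 1).countP (fun j => pvGet2 b j i)) && t.all (fun i => decide (1 ≤ (PySem.List.pyRange 0 elem 1).countP (fun j => pvGet2 b j i)))))) := by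
          rw [Bool.and_comm (decide (1 ≤ (PySem.List.pyRange 0 elem 1).countP (fun j => pvGet2 b j i))) fs, Bool.and_assoc]
        rw [e1, e2]
        rfl
      · rw [if_neg h1, if_neg h1]
    · rw [if_pos (by rw [pvRowOK]; simp_all)]
      simp [hc]

-- the irreflexivity flag: the i == j test inside the j-loop only fires at j = i
theorem pvIrrA (b : List (List Bool)) (nn : List Int) :
    (nn.all fun i => nn.all fun j => !(i == j && pvGet2 b i j)) = (nn.all fun i => !(pvGet2 b i i)) := by
  rw [Bool.eq_iff_iff]
  simp only [List.all_eq_true]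
  constructor
  · intro h i hi
    simpa using h i hi i hi
  · intro h i hi j hj
    by_cases hij : i = j
    · subst hij; simpa using h i hi
    · simp [hij]

-- the '"R" in classe and "S" in classe and "T" in classe' test reads back the three flags
theorem pvEIn (a0 a1 a2 : Bool) :
    (PySem.Str.isIn "R" ((if a0 then "R" else "") ++ (if a1 then "S" else "") ++ (if a2 then "T" else "")) &&
      PySem.Str.isIn "S" ((if a0 then "R" else "") ++ (if a1 then "S" else "") ++ (if a2 then "T" else "")) &&
      PySem.Str.isIn "T" ((if a0 then "R" else "") ++ (if a1 then "S" else "") ++ (if a2 then "T" else "")))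
    = (a0 && a1 && a2) := by
  cases a0 <;> cases a1 <;> cases a2 <;> decide

-- ---- B-side lemmas: the edge list speaks for the matrix ----
theorem pvMemEdges (b : List (List Bool)) (elem : Int) (p : Int × Int) :
    p ∈ pvEdges b elem ↔
      p.1 ∈ PySem.List.pyRange 0 elem 1 ∧ p.2 ∈ PySem.List.pyRange 0 elem 1 ∧
        pvGet2 b p.1 p.2 = true := by
  obtain ⟨i, j⟩ := p
  simp only [pvEdges, List.mem_flatMap, List.mem_map, List.mem_filter, Prod.mk.injEq]
  constructor
  · rintro ⟨x, hx, y, ⟨hy, hg⟩, hxi, hyj⟩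
    subst hxi; subst hyj; exact ⟨hx, hy, hg⟩
  · rintro ⟨hi, hj, hg⟩
    exact ⟨i, hi, j, ⟨hj, hg⟩, rfl, rfl⟩

theorem pvContainsE (E : List (Int × Int)) (p : Int × Int) :
    PySem.Set.contains (PySem.Set.ofList E) p = true ↔ p ∈ E := by
  show List.contains _ _ = true ↔ _
  rw [List.contains_iff_mem, PySem.Set.mem_ofList]

theorem pvReflEq (b : List (List Bool)) (elem : Int) :
    ((PySem.List.pyRange 0 elem 1).all fun i =>
        PySem.Set.contains (PySem.Set.ofList (pvEdges b elem)) (i, i))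
    = ((PySem.List.pyRange 0 elem 1).all fun i => pvGet2 b i i) := by
  rw [Bool.eq_iff_iff]
  simp only [List.all_eq_true, pvContainsE, pvMemEdges]
  exact ⟨fun h i hi => (h i hi).2.2, fun h i hi => ⟨hi, hi, h i hi⟩⟩

theorem pvIrrEq (b : List (List Bool)) (elem : Int) :
    ((pvEdges b elem).all fun e => e.1 != e.2)
    = ((PySem.List.pyRange 0 elem 1).all fun i => !(pvGet2 b i i)) := by
  rw [Bool.eq_iff_iff]
  simp only [List.all_eq_true, bne_iff_ne, ne_eq, Bool.not_eq_true']
  constructor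
  · intro h i hi
    by_contra hg
    exact h (i, i) ((pvMemEdges b elem (i, i)).mpr
      ⟨hi, hi, by simpa using hg⟩) rfl
  · rintro h ⟨i, j⟩ he hij
    obtain ⟨hi, _, hg⟩ := (pvMemEdges b elem (i, j)).mp he
    simp only at hij
    subst hij
    exact absurd (h i hi) (by simp [hg])

theorem pvSymmEq (b : List (List Bool)) (elem : Int) :
    ((pvEdges b elem).all fun e =>
        PySem.Set.contains (PySem.Set.ofList (pvEdges b elem)) (e.2, e.1))
    = ((PySem.List.pyRange 0 elem 1).all fun i =>
        (PySem.List.pyRange 0 elem 1).all fun j => (!(pvGet2 b i j) || pvGet2 b j i)) := by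
  rw [Bool.eq_iff_iff]
  simp only [List.all_eq_true, pvContainsE, Bool.or_eq_true, Bool.not_eq_true']
  constructor
  · intro h i hi j hj
    by_cases hg : pvGet2 b i j = true
    · exact Or.inr ((pvMemEdges b elem (j, i)).mp
        (h (i, j) ((pvMemEdges b elem (i, j)).mpr ⟨hi, hj, hg⟩))).2.2
    · exact Or.inl (by simpa using hg)
  · rintro h ⟨i, j⟩ he
    obtain ⟨hi, hj, hg⟩ := (pvMemEdges b elem (i, j)).mp he
    rcases h i hi j hj with hng | hji
    · exact absurd hg (by simp [hng])
    · exact (pvMemEdges b elem (j, i)).mpr ⟨hj, hi, hji⟩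

theorem pvTransEq (b : List (List Bool)) (elem : Int) :
    ((pvEdges b elem).all fun e => (pvEdges b elem).all fun f =>
        (f.1 != e.2 || PySem.Set.contains (PySem.Set.ofList (pvEdges b elem)) (e.1, f.2)))
    = ((PySem.List.pyRange 0 elem 1).all fun i =>
        (PySem.List.pyRange 0 elem 1).all fun j =>
          (PySem.List.pyRange 0 elem 1).all fun k =>
            (!(pvGet2 b i j && pvGet2 b j k) || pvGet2 b i k)) := by
  rw [Bool.eq_iff_iff]
  simp only [List.all_eq_true, Bool.or_eq_true, bne_iff_ne, ne_eq, pvContainsE,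
    Bool.not_eq_true', Bool.and_eq_false_iff]
  constructor
  · intro h i hi j hj k hk
    by_cases hij : pvGet2 b i j = true
    · by_cases hjk : pvGet2 b j k = true
      · refine Or.inr ?_
        have := h (i, j) ((pvMemEdges b elem (i, j)).mpr ⟨hi, hj, hij⟩)
          (j, k) ((pvMemEdges b elem (j, k)).mpr ⟨hj, hk, hjk⟩)
        rcases this with hne | hmem
        · exact absurd rfl hne
        · exact ((pvMemEdges b elem (i, k)).mp hmem).2.2
      · exact Or.inl (Or.inr (by simpa using hjk))
    · exact Or.inl (Or.inl (by simpa using hij))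
  · rintro h ⟨i, j⟩ he ⟨j', k⟩ hf
    obtain ⟨hi, hj, hij⟩ := (pvMemEdges b elem (i, j)).mp he
    obtain ⟨hj', hk, hjk⟩ := (pvMemEdges b elem (j', k)).mp hf
    simp only
    by_cases hjj : j' = j
    · subst hjj
      rcases h i hi j' hj k hk with hfalse | hik
      · rcases hfalse with h1 | h2
        · exact absurd hij (by simp [h1])
        · exact absurd hjk (by simp [h2])
      · exact Or.inr ((pvMemEdges b elem (i, k)).mpr ⟨hi, hk, hik⟩)
    · exact Or.inl hjj

-- a Nodup list counts (j == a && q j) as the indicator of q a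
theorem pvCountPBeq (l : List Int) (a : Int) (q : Int → Bool) (hnd : l.Nodup) (ha : a ∈ l) :
    l.countP (fun j => (j == a) && q j) = if q a then 1 else 0 := by
  induction l with
  | nil => cases ha
  | cons x t ih =>
    rcases List.nodup_cons.mp hnd with ⟨hxt, hndt⟩
    rcases List.mem_cons.mp ha with hax | hat
    · rw [List.countP_cons, hax]
      have h0 : t.countP (fun j => (j == x) && q j) = 0 :=
        List.countP_eq_zero.mpr (fun j hj => by
          have hjx : j ≠ x := fun hh => hxt (hh ▸ hj)
          simp [hjx])
      by_cases hq : q x = true <;> simp [h0, hq]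
    · have hxa : (x == a && q x) = false := by
        have hne : x ≠ a := fun hh => hxt (hh ▸ hat)
        simp [hne]
      rw [List.countP_cons, ih hndt hat, hxa]
      simp

-- all over a list only depends on the predicate's values on its members
theorem pvAllCongr (l : List Int) (p q : Int → Bool) (h : ∀ x ∈ l, p x = q x) :
    l.all p = l.all q := by
  induction l with
  | nil => rfl
  | cons x t ih =>
    simp only [List.all_cons, h x List.mem_cons_self,
      ih (fun y hy => h y (List.mem_cons_of_mem x hy))]

-- indicator sum over a list is countP
theorem pvSumIte (l : List Int) (p : Int → Bool) :
    (l.map (fun x => if p x then 1 else 0)).sum = l.countP p := by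
  induction l with
  | nil => rfl
  | cons x t ih =>
    rw [List.map_cons, List.sum_cons, ih, List.countP_cons]
    by_cases h : p x = true <;> simp [h, Nat.add_comm]

-- column degree: the count of i among the edge targets is the column countP of A
theorem pvColCount (b : List (List Bool)) (elem i : Int)
    (hi : i ∈ PySem.List.pyRange 0 elem 1) :
    ((pvEdges b elem).map (fun e => e.2)).count i
    = (PySem.List.pyRange 0 elem 1).countP (fun j => pvGet2 b j i) := by
  rw [show ((pvEdges b elem).map (fun e => e.2))
        = (PySem.List.pyRange 0 elem 1).flatMap
            (fun x => (PySem.List.pyRange 0 elem 1).filter (fun j => pvGet2 b x j)) from by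
      simp [pvEdges, List.map_flatMap, List.map_map, Function.comp_def]]
  rw [List.count, List.countP_flatMap, ← pvSumIte]
  congr 1
  apply List.map_congr_left
  intro x hx
  rw [Function.comp_apply, List.countP_filter,
    pvCountPBeq _ i _ (PySem.List.nodup_pyRange_one 0 elem) hi]

-- B's indegree dict reads back the column countP (for indices in range)
theorem pvIndegEq (b : List (List Bool)) (elem i : Int)
    (hi : i ∈ PySem.List.pyRange 0 elem 1) :
    (((pvEdges b elem).map (fun e => e.2)).foldl
        (fun (d : PySem.Dict Int Int) x => d.insert x (d.getD x 0 + 1))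
        PySem.Dict.empty).getD i 0
    = ((PySem.List.pyRange 0 elem 1).countP (fun j => pvGet2 b j i) : Int) := by
  rw [PySem.Dict.foldl_insert_getD_add_one_eq_counter, PySem.Dict.getD_counter,
    pvColCount b elem i hi]

-- ===== VERDICT (by name: the statement is the Claim_ definition above) =====
theorem classifica_spec : Claim_equal_classifica := by
  unfold Claim_equal_classifica
  intro b elem _ _
  unfold Spec_classifica
  by_cases h0 : (elem == 0) = true
  · simp [classifica, classifica_alt, h0]
  · simp only [classifica, classifica_alt, h0, Bool.false_eq_true, if_false]
    rw [pvFoldI]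
    simp only [Bool.true_and, pvBoolSymm, pvClassificaFuncao, pvGoA_eq,
      List.not_any_eq_all_not]
    rw [pvIrrA, pvReflEq, pvIrrEq, pvSymmEq, pvTransEq]
    generalize ((PySem.List.pyRange 0 elem 1).all fun i => pvGet2 b i i) = a0
    generalize ((PySem.List.pyRange 0 elem 1).all fun i =>
      (PySem.List.pyRange 0 elem 1).all fun j => (!pvGet2 b i j || pvGet2 b j i)) = a1
    generalize ((PySem.List.pyRange 0 elem 1).all fun i =>
      (PySem.List.pyRange 0 elem 1).all fun j => (PySem.List.pyRange 0 elem 1).all fun k =>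
        (!(pvGet2 b i j && pvGet2 b j k) || pvGet2 b i k)) = a2
    generalize ((PySem.List.pyRange 0 elem 1).all fun i => !pvGet2 b i i) = a3
    rw [pvEIn]
    have hrw : ((PySem.List.pyRange 0 elem 1).any fun i =>
        (PySem.List.pyGetD b i []).count true != 1)
        = !((PySem.List.pyRange 0 elem 1).all fun i =>
            ((PySem.List.pyGetD b i []).count true == 1)) := by
      simp [List.not_all_eq_any_not, bne]
    rw [hrw]
    have hfs : ∀ i ∈ PySem.List.pyRange 0 elem 1,
        (decide (1 ≤ (((pvEdges b elem).map (fun e => e.2)).foldl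
            (fun (d : PySem.Dict Int Int) x => d.insert x (d.getD x 0 + 1))
            PySem.Dict.empty).getD i 0))
        = decide (1 ≤ (PySem.List.pyRange 0 elem 1).countP (fun j => pvGet2 b j i)) := by
      intro i hi
      rw [pvIndegEq b elem i hi]
      simp
    have hfi : ∀ i ∈ PySem.List.pyRange 0 elem 1,
        (decide ((((pvEdges b elem).map (fun e => e.2)).foldl
            (fun (d : PySem.Dict Int Int) x => d.insert x (d.getD x 0 + 1))
            PySem.Dict.empty).getD i 0 ≤ 1))
        = decide ((PySem.List.pyRange 0 elem 1).countP (fun j => pvGet2 b j i) ≤ 1) := by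
      intro i hi
      rw [pvIndegEq b elem i hi]
      simp
    rw [pvAllCongr _ _ _ hfs, pvAllCongr _ _ _ hfi]
    by_cases hrow : ((PySem.List.pyRange 0 elem 1).all fun i =>
        (List.count true (PySem.List.pyGetD b i []) == 1)) = true
    · rw [if_pos hrow, hrow]
      simp only [Bool.not_true, Bool.false_eq_true, if_false]
      rw [← String.append_assoc]
      congr 1
      generalize ((PySem.List.pyRange 0 elem 1).all fun i =>
        decide (List.countP (fun j => pvGet2 b j i) (PySem.List.pyRange 0 elem 1) ≤ 1)) = fI
      generalize ((PySem.List.pyRange 0 elem 1).all fun i =>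
        decide (1 ≤ List.countP (fun j => pvGet2 b j i) (PySem.List.pyRange 0 elem 1))) = fS
      cases fI <;> cases fS <;> rfl
    · have hfalse : ((PySem.List.pyRange 0 elem 1).all fun i =>
          (List.count true (PySem.List.pyGetD b i []) == 1)) = false := by
        revert hrow
        cases ((PySem.List.pyRange 0 elem 1).all fun i =>
          (List.count true (PySem.List.pyGetD b i []) == 1)) <;> simp
      rw [hfalse]
      simp [String.append_empty]
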